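-- pv_equiv track=rewrite | github.com/Bayl3x/ML-ImageDatasets | Phase3/utils.py | knn_default
-- ===== SOURCE A (Python) =====
-- def knn_default(ind, dists, imageDataMatrix):
--     votes = [[0,0],[0,0],[0,0],[0,0]]
--     for i in range(len(ind)):
--         nearbyNeighbor = imageDataMatrix[ind[i]]
--         if nearbyNeighbor[1] == 'right':
--             votes[0][0] += 1
--         else:
--             votes[0][1] += 1
--         if nearbyNeighbor[2] == 'dorsal':
--             votes[1][0] += 1
--         else:
--             votes[1][1] += 1
--         if nearbyNeighbor[3] == 'accessories':
--             votes[2][0] += 1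
--         else:
--             votes[2][1] += 1
--         if nearbyNeighbor[4] == 'male':
--             votes[3][0] += 1
--         else:
--             votes[3][1] += 1
--     return votes
-- ===== SOURCE B (Python) =====
-- def knn_default(ind, dists, imageDataMatrix):
--     votes = []
--     for col, val in ((1, 'right'), (2, 'dorsal'), (3, 'accessories'), (4, 'male')):
--         pos = sum(1 for i in ind if imageDataMatrix[i][col] == val)
--         votes.append([pos, len(ind) - pos])
--     return votes
-- ===== Notes on version B (the rewrite author's own statement) =====
-- stated objective: simpler
-- what changed: B replaces A's single loop that mutates eight counters across four categories with four independent passes, each counting the positive matches for one (column, value) pair and deriving the negatives as len(ind) - positives.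
import Mathlib
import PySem

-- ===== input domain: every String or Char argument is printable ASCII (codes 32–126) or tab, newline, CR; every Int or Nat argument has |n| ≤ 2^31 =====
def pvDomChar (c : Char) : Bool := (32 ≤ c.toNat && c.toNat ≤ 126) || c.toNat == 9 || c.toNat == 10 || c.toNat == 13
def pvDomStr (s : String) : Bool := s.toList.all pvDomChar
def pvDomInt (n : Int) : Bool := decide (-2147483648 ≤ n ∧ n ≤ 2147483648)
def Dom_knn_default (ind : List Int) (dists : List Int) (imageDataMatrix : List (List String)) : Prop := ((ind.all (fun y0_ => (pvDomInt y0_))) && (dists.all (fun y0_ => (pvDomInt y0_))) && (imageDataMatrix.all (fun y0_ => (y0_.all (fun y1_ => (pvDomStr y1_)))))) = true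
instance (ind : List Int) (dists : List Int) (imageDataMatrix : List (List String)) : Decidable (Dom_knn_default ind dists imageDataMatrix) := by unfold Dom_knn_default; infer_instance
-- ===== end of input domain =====

-- B replaces A's single loop over eight mutable counters with four independent
-- counting passes (one per category); objective: simpler decomposition, same O(n) cost.

-- ===== PORT A =====
-- A's `votes` (a 4×2 list of mutable counters) is modelled as a tuple of four
-- Int pairs threaded through the loop; the final list literal rebuilds the rows.
def knn_default (ind : List Int) (dists : List Int) (imageDataMatrix : List (List String)) : List (List Int) :=
  let _ := dists
  let votes := ind.foldl (fun (v : (Int × Int) × (Int × Int) × (Int × Int) × (Int × Int)) i =>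
      let nb := PySem.List.pyGetD imageDataMatrix i []
      let v0 := if PySem.List.pyGetD nb 1 "" == "right" then (v.1.1 + 1, v.1.2) else (v.1.1, v.1.2 + 1)
      let v1 := if PySem.List.pyGetD nb 2 "" == "dorsal" then (v.2.1.1 + 1, v.2.1.2) else (v.2.1.1, v.2.1.2 + 1)
      let v2 := if PySem.List.pyGetD nb 3 "" == "accessories" then (v.2.2.1.1 + 1, v.2.2.1.2) else (v.2.2.1.1, v.2.2.1.2 + 1)
      let v3 := if PySem.List.pyGetD nb 4 "" == "male" then (v.2.2.2.1 + 1, v.2.2.2.2) else (v.2.2.2.1, v.2.2.2.2 + 1)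
      (v0, v1, v2, v3)) ((0, 0), (0, 0), (0, 0), (0, 0))
  [[votes.1.1, votes.1.2], [votes.2.1.1, votes.2.1.2],
   [votes.2.2.1.1, votes.2.2.1.2], [votes.2.2.2.1, votes.2.2.2.2]]

-- ===== PORT B =====
def knn_default_alt (ind : List Int) (dists : List Int) (imageDataMatrix : List (List String)) : List (List Int) :=
  let _ := dists
  ([((1 : Int), "right"), (2, "dorsal"), (3, "accessories"), (4, "male")] : List (Int × String)).map
    (fun p =>
      let pos : Int :=
        (ind.filter (fun i => PySem.List.pyGetD (PySem.List.pyGetD imageDataMatrix i []) p.1 "" == p.2)).length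
      [pos, (ind.length : Int) - pos])

-- ===== PRECONDITION & SPEC =====
-- Pre_ excludes exactly the inputs on which Python A raises IndexError:
-- an index in `ind` out of range for imageDataMatrix, or a selected row with fewer than 5 entries.
def Pre_knn_default (ind : List Int) (dists : List Int) (imageDataMatrix : List (List String)) : Prop :=
  (ind.all (fun i =>
    match PySem.List.pyGet? imageDataMatrix i with
    | some r => decide (5 ≤ r.length)
    | none => false)) = true
instance (ind : List Int) (dists : List Int) (imageDataMatrix : List (List String)) : Decidable (Pre_knn_default ind dists imageDataMatrix) := by unfold Pre_knn_default; infer_instance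

def pvWitness_knn_default : List Int × List Int × List (List String) :=
  ([0, -1], [7], [["id", "right", "ventral", "accessories", "female"]])

def Spec_knn_default (ind : List Int) (dists : List Int) (imageDataMatrix : List (List String)) (out : List (List Int)) : Prop := out = knn_default_alt ind dists imageDataMatrix
instance (ind : List Int) (dists : List Int) (imageDataMatrix : List (List String)) (out : List (List Int)) : Decidable (Spec_knn_default ind dists imageDataMatrix out) := by unfold Spec_knn_default; infer_instance

-- ===== CLAIM (what is proved, stated in full; the proofs are below) =====
def Claim_equal_knn_default : Prop := ∀ (ind : List Int) (dists : List Int) (imageDataMatrix : List (List String)), Dom_knn_default ind dists imageDataMatrix → Pre_knn_default ind dists imageDataMatrix → Spec_knn_default ind dists imageDataMatrix (knn_default ind dists imageDataMatrix)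

-- ===== LEMMAS AND PROOFS =====

-- a [pos, neg] counting pair as a fold over one category
lemma pair_fold (p : Int → Bool) (l : List Int) (a b : Int) :
    l.foldl (fun (s : Int × Int) i => if p i then (s.1 + 1, s.2) else (s.1, s.2 + 1)) (a, b)
      = (a + (l.countP p : Int), b + ((l.countP (fun i => !p i)) : Int)) := by
  induction l generalizing a b with
  | nil => simp
  | cons x t ih =>
    by_cases h : p x
    · simp [h, ih]
      ring
    · simp [h, ih]
      ring

lemma countP_not_eq (p : Int → Bool) (l : List Int) :
    (l.countP (fun i => !p i)) = l.length - l.countP p := by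
  induction l with
  | nil => simp
  | cons x t ih =>
    have hle := List.countP_le_length (p := p) (l := t)
    by_cases h : p x <;> simp [h, List.countP_cons, ih] <;> omega

-- ===== VERDICT =====
theorem knn_default_spec : Claim_equal_knn_default := by
  intro ind dists m _ _
  unfold Spec_knn_default
  simp only [knn_default, knn_default_alt]
  rw [PySem.List.foldl_prod_mk
        (f := fun (s : Int × Int) i => if PySem.List.pyGetD (PySem.List.pyGetD m i []) 1 "" == "right" then (s.1 + 1, s.2) else (s.1, s.2 + 1))
        (g := fun (s : (Int × Int) × (Int × Int) × (Int × Int)) i =>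
          ((if PySem.List.pyGetD (PySem.List.pyGetD m i []) 2 "" == "dorsal" then (s.1.1 + 1, s.1.2) else (s.1.1, s.1.2 + 1)),
           (if PySem.List.pyGetD (PySem.List.pyGetD m i []) 3 "" == "accessories" then (s.2.1.1 + 1, s.2.1.2) else (s.2.1.1, s.2.1.2 + 1)),
           (if PySem.List.pyGetD (PySem.List.pyGetD m i []) 4 "" == "male" then (s.2.2.1 + 1, s.2.2.2) else (s.2.2.1, s.2.2.2 + 1)))),
      PySem.List.foldl_prod_mk
        (f := fun (s : Int × Int) i => if PySem.List.pyGetD (PySem.List.pyGetD m i []) 2 "" == "dorsal" then (s.1 + 1, s.2) else (s.1, s.2 + 1))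
        (g := fun (s : (Int × Int) × (Int × Int)) i =>
          ((if PySem.List.pyGetD (PySem.List.pyGetD m i []) 3 "" == "accessories" then (s.1.1 + 1, s.1.2) else (s.1.1, s.1.2 + 1)),
           (if PySem.List.pyGetD (PySem.List.pyGetD m i []) 4 "" == "male" then (s.2.1 + 1, s.2.2) else (s.2.1, s.2.2 + 1)))),
      PySem.List.foldl_prod_mk
        (f := fun (s : Int × Int) i => if PySem.List.pyGetD (PySem.List.pyGetD m i []) 3 "" == "accessories" then (s.1 + 1, s.2) else (s.1, s.2 + 1))
        (g := fun (s : Int × Int) i => if PySem.List.pyGetD (PySem.List.pyGetD m i []) 4 "" == "male" then (s.1 + 1, s.2) else (s.1, s.2 + 1)),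
      pair_fold, pair_fold, pair_fold, pair_fold]
  simp only [List.map_cons, List.map_nil, ← List.countP_eq_length_filter, zero_add]
  rw [countP_not_eq, countP_not_eq, countP_not_eq, countP_not_eq]
  have h1 := List.countP_le_length (p := fun i => PySem.List.pyGetD (PySem.List.pyGetD m i []) 1 "" == "right") (l := ind)
  have h2 := List.countP_le_length (p := fun i => PySem.List.pyGetD (PySem.List.pyGetD m i []) 2 "" == "dorsal") (l := ind)
  have h3 := List.countP_le_length (p := fun i => PySem.List.pyGetD (PySem.List.pyGetD m i []) 3 "" == "accessories") (l := ind)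
  have h4 := List.countP_le_length (p := fun i => PySem.List.pyGetD (PySem.List.pyGetD m i []) 4 "" == "male") (l := ind)
  rw [Nat.cast_sub h1, Nat.cast_sub h2, Nat.cast_sub h3, Nat.cast_sub h4]
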